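-- pv_equiv track=rewrite | github.com/amfeakes/electric_emus | Final/align_seqs_fasta.py | calculate_best
-- ===== SOURCE A (Python) =====
-- def calculate_score(s1, s2, l1, l2, startpoint):
--     """This computes the score."""
--     matched = "" # to hold string displaying alignements
--     score = 0
--     for i in range(l2):
--         if (i + startpoint) < l1:
--             if s1[i + startpoint] == s2[i]: # if the bases match
--                 matched = matched + "*"
--                 score = score + 1
--             else:
--                 matched = matched + "-"
--
--     return score
--
-- def calculate_best(s1, s2, l1, l2):
--     """This finds the best match for the fasta sequences."""
--     best_a = None
--     best_s = -1
--     for i in range(l1): # Note that you just take the last alignment with the highest score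
--         z = calculate_score(s1, s2, l1, l2, i)
--         if z > best_s:
--             best_a = "." * i + s2 # think about what this is doing!
--             best_s = z
--     return best_a, best_s
-- ===== SOURCE B (Python) =====
-- def calculate_best(s1, s2, l1, l2):
--     """Best sliding-offset alignment: one sweep fills a histogram of per-offset
--     match counts (diagonal accumulation), then the first maximum is picked."""
--     if l1 <= 0:
--         return None, -1
--     counts = [0] * l1
--     m = min(l1, l2)
--     for q in range(m):
--         cq = s2[q]
--         for i in range(l1 - q):
--             if s1[i + q] == cq:
--                 counts[i] += 1
--     best = max(counts)
--     i = counts.index(best)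
--     return "." * i + s2, best
-- ===== Notes on version B (the rewrite author's own statement) =====
-- stated objective: alternative
-- what changed: Instead of recomputing the score offset-by-offset with a running best, B fills a per-offset match-count histogram in one diagonal sweep over s2's positions and then takes the first maximum via max()/index(); Pre_ excludes exactly the inputs where A raises IndexError (l1 or min(l1,l2) exceeding the string lengths with both positive).
import Mathlib
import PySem

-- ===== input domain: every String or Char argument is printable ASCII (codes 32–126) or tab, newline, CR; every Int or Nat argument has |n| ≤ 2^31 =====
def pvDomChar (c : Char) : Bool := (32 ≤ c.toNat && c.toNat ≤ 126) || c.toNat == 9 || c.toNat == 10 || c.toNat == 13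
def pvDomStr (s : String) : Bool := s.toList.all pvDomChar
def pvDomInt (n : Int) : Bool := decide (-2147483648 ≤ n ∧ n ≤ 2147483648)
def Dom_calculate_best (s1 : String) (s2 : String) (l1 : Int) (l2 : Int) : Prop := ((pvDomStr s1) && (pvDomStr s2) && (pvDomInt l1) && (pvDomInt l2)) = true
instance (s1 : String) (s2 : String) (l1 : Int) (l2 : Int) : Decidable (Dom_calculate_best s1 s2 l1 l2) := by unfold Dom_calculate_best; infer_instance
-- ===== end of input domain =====

-- B replaces A's per-offset rescoring loop by one diagonal sweep filling a histogram of
-- per-offset match counts, then picks the first maximum (objective: alternative algorithmic shape).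

-- ===== PORT A =====
def calculate_score (s1 : String) (s2 : String) (l1 : Int) (l2 : Int) (startpoint : Int) : Int :=
  -- matched is built exactly as in the Python even though only score is returned
  ((PySem.List.pyRange 0 l2).foldl
    (fun (st : List Char × Int) i =>
      if i + startpoint < l1 then
        if (PySem.List.pyGet? s1.toList (i + startpoint)).getD '\x00' ==
           (PySem.List.pyGet? s2.toList i).getD '\x01' then
          (st.1 ++ ['*'], st.2 + 1)
        else
          (st.1 ++ ['-'], st.2)
      else st)
    ([], 0)).2

def calculate_best (s1 : String) (s2 : String) (l1 : Int) (l2 : Int) : Option String × Int :=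
  (PySem.List.pyRange 0 l1).foldl
    (fun (st : Option String × Int) i =>
      let z := calculate_score s1 s2 l1 l2 i
      if z > st.2 then (some (String.ofList (List.replicate i.toNat '.' ++ s2.toList)), z) else st)
    (none, -1)

-- ===== PORT B =====
def calculate_best_alt (s1 : String) (s2 : String) (l1 : Int) (l2 : Int) : Option String × Int :=
  if l1 ≤ 0 then (none, -1)
  else
    let counts0 : List Int := List.replicate l1.toNat 0
    let m := min l1 l2
    let counts := (PySem.List.pyRange 0 m).foldl
      (fun (counts : List Int) q =>
        let cq := (PySem.List.pyGet? s2.toList q).getD '\x01'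
        (PySem.List.pyRange 0 (l1 - q)).foldl
          (fun (counts : List Int) i =>
            if (PySem.List.pyGet? s1.toList (i + q)).getD '\x00' == cq then
              counts.set i.toNat (counts.getD i.toNat 0 + 1)
            else counts)
          counts)
      counts0
    let best := (PySem.List.max? counts (fun x => x)).getD 0
    let i := (PySem.List.index? counts best).getD 0
    (some (String.ofList (List.replicate i '.' ++ s2.toList)), best)

-- ===== PRECONDITION & SPEC =====
-- Pre_ excludes exactly the inputs on which the Python A raises IndexError:
-- with l1 > 0 and l2 > 0, A reads s1[0..l1-1] and s2[0..min(l1,l2)-1].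
def Pre_calculate_best (s1 : String) (s2 : String) (l1 : Int) (l2 : Int) : Prop :=
  l1 ≤ 0 ∨ l2 ≤ 0 ∨ (l1 ≤ (s1.toList.length : Int) ∧ min l1 l2 ≤ (s2.toList.length : Int))
instance (s1 : String) (s2 : String) (l1 : Int) (l2 : Int) : Decidable (Pre_calculate_best s1 s2 l1 l2) := by unfold Pre_calculate_best; infer_instance

def pvWitness_calculate_best : String × String × Int × Int := ("ACGT", "GT", 4, 2)

def Spec_calculate_best (s1 : String) (s2 : String) (l1 : Int) (l2 : Int) (out : Option String × Int) : Prop := out = calculate_best_alt s1 s2 l1 l2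
instance (s1 : String) (s2 : String) (l1 : Int) (l2 : Int) (out : Option String × Int) : Decidable (Spec_calculate_best s1 s2 l1 l2 out) := by unfold Spec_calculate_best; infer_instance

-- ===== CLAIM (what is proved, stated in full; the proofs are below) =====
def Claim_equal_calculate_best : Prop := ∀ (s1 : String) (s2 : String) (l1 : Int) (l2 : Int), Dom_calculate_best s1 s2 l1 l2 → Pre_calculate_best s1 s2 l1 l2 → Spec_calculate_best s1 s2 l1 l2 (calculate_best s1 s2 l1 l2)

-- ===== LEMMAS AND PROOFS =====

-- the per-position match predicate both programs count (s2's q-th base against offset i)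
def pvPred (c1 c2 : List Char) (n : Nat) (i q : Nat) : Bool :=
  decide (i + q < n) &&
    ((PySem.List.pyGet? c1 (↑(i + q))).getD '\x00' == (PySem.List.pyGet? c2 (↑q)).getD '\x01')

-- the common score specification: match count of offset i
def pvSc (c1 c2 : List Char) (n mN : Nat) (i : Nat) : Int :=
  ((List.range mN).countP (pvPred c1 c2 n i) : Int)

lemma pv_pyRange_empty (m : Int) (h : m ≤ 0) : PySem.List.pyRange 0 m = [] := by
  simp [PySem.List.pyRange]; omega

lemma pv_countP_range_of_false_above (p : Nat → Bool) :
    ∀ a b, b ≤ a → (∀ j, b ≤ j → j < a → p j = false) →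
    (List.range a).countP p = (List.range b).countP p := by
  intro a
  induction a with
  | zero =>
      intro b hb _
      have : b = 0 := by omega
      rw [this]
  | succ a ih =>
      intro b hb hf
      rcases Nat.eq_or_lt_of_le hb with h | h
      · rw [h]
      · have hba : b ≤ a := by omega
        rw [List.range_succ, List.countP_append,
          ih b hba (fun j h1 h2 => hf j h1 (by omega))]
        simp [hf a hba (by omega)]

-- A's score loop computes the common score specification
lemma pv_score_eq (s1 s2 : String) (l1 l2 : Int) (i : Nat) (hl1 : 0 < l1) :
    calculate_score s1 s2 l1 l2 ↑i
      = pvSc s1.toList s2.toList l1.toNat (min l1 l2).toNat i := by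
  unfold calculate_score pvSc
  by_cases hl2 : l2 ≤ 0
  · rw [pv_pyRange_empty l2 hl2]
    have : (min l1 l2).toNat = 0 := by omega
    simp [this]
  · have hl2' : 0 < l2 := by omega
    have h2 : l2 = ((l2.toNat : Nat) : Int) := by omega
    conv_lhs => rw [h2]
    rw [PySem.List.pyRange_zero_natCast, List.foldl_map]
    rw [PySem.List.foldl_congr_mem _ _
      (fun (st : List Char × Int) (j : Nat) =>
        ((fun (a : List Char) (j : Nat) =>
            if ((j : Int) + (i : Int) < l1) then
              a ++ [if (PySem.List.pyGet? s1.toList ((j : Int) + (i : Int))).getD '\x00' ==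
                       (PySem.List.pyGet? s2.toList (j : Int)).getD '\x01' then '*' else '-']
            else a) st.1 j,
         (fun (b : Int) (j : Nat) =>
            if (decide ((j : Int) + (i : Int) < l1) &&
              ((PySem.List.pyGet? s1.toList ((j : Int) + (i : Int))).getD '\x00' ==
               (PySem.List.pyGet? s2.toList (j : Int)).getD '\x01')) = true then b + 1 else b) st.2 j)) _ ?_]
    · rw [PySem.List.foldl_prod_mk
        (fun (a : List Char) (j : Nat) =>
            if ((j : Int) + (i : Int) < l1) then
              a ++ [if (PySem.List.pyGet? s1.toList ((j : Int) + (i : Int))).getD '\x00' ==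
                       (PySem.List.pyGet? s2.toList (j : Int)).getD '\x01' then '*' else '-']
            else a)
        (fun (b : Int) (j : Nat) =>
            if (decide ((j : Int) + (i : Int) < l1) &&
              ((PySem.List.pyGet? s1.toList ((j : Int) + (i : Int))).getD '\x00' ==
               (PySem.List.pyGet? s2.toList (j : Int)).getD '\x01')) = true then b + 1 else b)]
      simp only
      rw [PySem.List.foldl_count_if]
      rw [pv_countP_range_of_false_above _ l2.toNat (min l1 l2).toNat (by omega) ?_]
      · rw [zero_add]
        congr 1
        apply List.countP_congr
        intro j hj
        simp only [List.mem_range] at hj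
        unfold pvPred
        have hcast : (j : Int) + (i : Int) = ((i + j : Nat) : Int) := by push_cast; ring
        rw [hcast]
        have hd : decide (((i + j : Nat) : Int) < l1) = decide (i + j < l1.toNat) := by
          simp only [decide_eq_decide]; omega
        rw [hd]
      · intro q hq hq2
        have : ¬ ((q : Int) + (i : Int) < l1) := by omega
        simp [this]
    · intro acc j hj
      clear h2 hj
      by_cases h : (j : Int) + (i : Int) < l1
      · simp only [if_pos h]
        split_ifs with hc1 hc2 <;> simp_all
      · simp [h]

lemma pv_set_map_range (f : Nat → Int) (n k : Nat) (v : Int) :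
    ((List.range n).map f).set k v
      = (List.range n).map (fun i => if i = k then v else f i) := by
  apply List.ext_getElem
  · simp
  · intro i h1 h2
    simp only [List.getElem_set, List.getElem_map, List.getElem_range]
    split_ifs with h h' h'
    · simp
    · omega
    · omega
    · rfl

-- B's inner loop adds the match indicator to every histogram slot
lemma pv_inner_fold (c1 : List Char) (cq : Char) (n q : Nat) (f : Nat → Int) :
    ∀ b, b ≤ n →
    (List.map (fun (k : Nat) => (k : Int)) (List.range b)).foldl
      (fun (counts : List Int) i =>
        if (PySem.List.pyGet? c1 (i + ↑q)).getD '\x00' == cq then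
          counts.set i.toNat (counts.getD i.toNat 0 + 1)
        else counts)
      ((List.range n).map f)
    = (List.range n).map (fun i =>
        f i + if i < b ∧ ((PySem.List.pyGet? c1 (↑(i + q))).getD '\x00' == cq) then 1 else 0) := by
  intro b
  rw [List.foldl_map]
  induction b generalizing f with
  | zero =>
      intro _
      simp
  | succ b ih =>
      intro hb
      rw [List.range_succ, List.foldl_append, ih f (by omega)]
      simp only [List.foldl_cons, List.foldl_nil, Int.toNat_natCast]
      have hcast : ((b : Int) + (q : Int)) = ((b + q : Nat) : Int) := by push_cast; ring
      rw [hcast]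
      by_cases hc : ((PySem.List.pyGet? c1 ((b + q : Nat) : Int)).getD '\x00' == cq) = true
      · rw [if_pos hc]
        rw [PySem.List.getD_map_range _ n b _ (by omega)]
        rw [pv_set_map_range]
        apply List.map_congr_left
        intro i hi
        simp only [List.mem_range] at hi
        by_cases hib : i = b
        · subst hib
          rw [Nat.cast_add] at hc
          simpa using hc
        · split_ifs with hA hB hB <;> simp_all <;> omega
      · rw [if_neg hc]
        apply List.map_congr_left
        intro i hi
        simp only [List.mem_range] at hi
        by_cases hib : i = b
        · subst hib
          rw [Nat.cast_add] at hc
          simpa using hc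
        · split_ifs with hA hB hB <;> simp_all <;> omega

-- B's outer loop builds the full histogram of per-offset scores
lemma pv_outer_fold (s1 s2 : String) (l1 l2 : Int) (hl1 : 0 < l1) :
    ∀ k, k ≤ (min l1 l2).toNat →
    (List.map (fun (q : Nat) => (q : Int)) (List.range k)).foldl
      (fun (counts : List Int) q =>
        let cq := (PySem.List.pyGet? s2.toList q).getD '\x01'
        (PySem.List.pyRange 0 (l1 - q)).foldl
          (fun (counts : List Int) i =>
            if (PySem.List.pyGet? s1.toList (i + q)).getD '\x00' == cq then
              counts.set i.toNat (counts.getD i.toNat 0 + 1)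
            else counts)
          counts)
      (List.replicate l1.toNat 0)
    = (List.range l1.toNat).map (fun i =>
        ((List.range k).countP (pvPred s1.toList s2.toList l1.toNat i) : Int)) := by
  intro k
  induction k with
  | zero =>
      intro _
      simp
  | succ k ih =>
      intro hk
      rw [List.range_succ, List.map_append, List.foldl_append, ih (by omega)]
      simp only [List.map_cons, List.map_nil, List.foldl_cons, List.foldl_nil]
      have hq : l1 - (k : Int) = ((l1.toNat - k : Nat) : Int) := by omega
      rw [hq, PySem.List.pyRange_zero_natCast]
      rw [pv_inner_fold s1.toList _ l1.toNat k _ (l1.toNat - k) (by omega)]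
      apply List.map_congr_left
      intro i hi
      simp only [List.mem_range] at hi
      rw [List.countP_append]
      simp only [List.countP_cons, List.countP_nil]
      unfold pvPred
      push_cast
      rw [zero_add]
      congr 1
      simp only [Bool.and_eq_true, decide_eq_true_eq, beq_iff_eq]
      split_ifs with h1 h2 h2
      · rfl
      · exact absurd ⟨by omega, h1.2⟩ h2
      · exact absurd ⟨by omega, h2.2⟩ h1
      · rfl

-- A's selection loop keeps the first strict improvement: first argmax
lemma pv_argmax (sc : Nat → Int) (g : Nat → Option String) (hsc : ∀ i, 0 ≤ sc i) :
    ∀ n, 0 < n →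
    ∃ j, j < n ∧
      (List.range n).foldl
        (fun (st : Option String × Int) i =>
          if sc i > st.2 then (g i, sc i) else st) (none, -1)
        = (g j, sc j)
      ∧ (∀ i, i < j → sc i < sc j) ∧ (∀ i, i < n → sc i ≤ sc j) := by
  intro n
  induction n with
  | zero => intro h; omega
  | succ n ih =>
      intro _
      by_cases hn : 0 < n
      · obtain ⟨j, hj, heq, hstrict, hmax⟩ := ih hn
        rw [List.range_succ, List.foldl_append, heq]
        simp only [List.foldl_cons, List.foldl_nil]
        by_cases hgt : sc n > sc j
        · refine ⟨n, by omega, by simp [hgt], ?_, ?_⟩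
          · intro i hi
            exact lt_of_le_of_lt (hmax i hi) hgt
          · intro i hi
            rcases Nat.lt_succ_iff_lt_or_eq.mp hi with h | h
            · exact le_of_lt (lt_of_le_of_lt (hmax i h) hgt)
            · subst h; exact le_refl _
        · refine ⟨j, by omega, by simp [hgt], hstrict, ?_⟩
          intro i hi
          rcases Nat.lt_succ_iff_lt_or_eq.mp hi with h | h
          · exact hmax i h
          · subst h; omega
      · have hn0 : n = 0 := by omega
        subst hn0
        refine ⟨0, by omega, ?_, by omega, ?_⟩
        · have h0 : sc 0 > -1 := by have := hsc 0; omega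
          simp [h0]
        · intro i hi
          have : i = 0 := by omega
          subst this; exact le_refl _

-- ===== VERDICT (by name: the statement is the Claim_ definition above) =====
theorem calculate_best_spec : Claim_equal_calculate_best := by
  intro s1 s2 l1 l2 _ hpre
  unfold Spec_calculate_best
  by_cases hl1 : l1 ≤ 0
  · unfold calculate_best calculate_best_alt
    rw [pv_pyRange_empty l1 hl1, if_pos hl1]
    rfl
  · have hl1' : 0 < l1 := by omega
    set n := l1.toNat with hn
    set mN := (min l1 l2).toNat with hmN
    set sc : Nat → Int := fun i => pvSc s1.toList s2.toList n mN i with hsc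
    have hscnn : ∀ i, 0 ≤ sc i := by
      intro i
      simp [hsc, pvSc]
    -- A side
    have hrange1 : PySem.List.pyRange 0 l1 = List.map (fun (k : Nat) => (k : Int)) (List.range n) := by
      rw [show l1 = ((l1.toNat : Nat) : Int) from by omega, PySem.List.pyRange_zero_natCast]
    unfold calculate_best
    rw [hrange1, List.foldl_map]
    rw [PySem.List.foldl_congr_mem _ _
      (fun (st : Option String × Int) (j : Nat) =>
        if sc j > st.2 then
          ((fun i => some (String.ofList (List.replicate i '.' ++ s2.toList))) j, sc j)
        else st) _ ?_]
    · obtain ⟨j, hjn, heq, hstrict, hmax⟩ :=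
        pv_argmax sc (fun i => some (String.ofList (List.replicate i '.' ++ s2.toList))) hscnn n (by omega)
      rw [heq]
      -- B side
      unfold calculate_best_alt
      rw [if_neg hl1]
      have hrange2 : PySem.List.pyRange 0 (min l1 l2)
          = List.map (fun (q : Nat) => (q : Int)) (List.range mN) := by
        by_cases hm : min l1 l2 ≤ 0
        · have h0 : mN = 0 := by omega
          rw [pv_pyRange_empty _ hm, h0]
          rfl
        · rw [show min l1 l2 = ((mN : Nat) : Int) from by omega, PySem.List.pyRange_zero_natCast]
      simp only
      rw [hrange2, pv_outer_fold s1 s2 l1 l2 hl1' mN (by omega)]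
      have hform : (List.range l1.toNat).map
          (fun i => (((List.range mN).countP (pvPred s1.toList s2.toList l1.toNat i)) : Int))
          = (List.range n).map sc := rfl
      rw [hform]
      set counts := (List.range n).map sc with hcounts
      have hclen : counts.length = n := by simp [hcounts]
      have hcne : counts ≠ [] := by
        intro h
        rw [h] at hclen
        simp at hclen
        omega
      obtain ⟨M, hM⟩ : ∃ M, PySem.List.max? counts (fun x => x) = some M := by
        cases hmx : PySem.List.max? counts (fun x => x) with
        | none => exact absurd ((PySem.List.max?_eq_none_iff counts (fun x => x)).mp hmx) hcne
        | some M => exact ⟨M, rfl⟩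
      have hMmax : ∀ y ∈ counts, y ≤ M := by
        intro y hy
        exact PySem.List.max?_isMax (key := fun x => x) hM y hy
      have hMmem : M ∈ counts := PySem.List.max?_mem (key := fun x => x) hM
      obtain ⟨k, hk⟩ : ∃ k, PySem.List.index? counts M = some k := by
        cases hix : PySem.List.index? counts M with
        | none =>
            have := (PySem.List.index?_isSome_iff counts M).mpr hMmem
            rw [hix] at this
            simp at this
        | some k => exact ⟨k, rfl⟩
      obtain ⟨hkl, hkv, hkfst⟩ := PySem.List.getElem_of_index?_eq_some hk
      have hkn : k < n := by omega
      have hgetsc : ∀ t (ht : t < n), counts[t]'(by omega) = sc t := by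
        intro t ht
        simp [hcounts]
      have hMsc : M = sc k := by rw [← hkv, hgetsc k hkn]
      have hjM : sc j = M := by
        apply le_antisymm
        · have : counts[j]'(by omega) ∈ counts := List.getElem_mem _
          rw [hgetsc j hjn] at this
          exact hMmax _ this
        · rw [hMsc]
          exact hmax k hkn
      have hjk : j = k := by
        by_contra hne
        rcases Nat.lt_or_ge j k with h | h
        · exact hkfst j h (by rw [hgetsc j hjn, hjM])
        · have hkj : k < j := by omega
          have := hstrict k hkj
          rw [← hMsc, hjM] at this
          omega
      rw [hM]
      simp only [Option.getD_some]
      rw [hk]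
      simp only [Option.getD_some]
      rw [hjk, ← hMsc]
    · intro acc j hj
      simp only
      rw [pv_score_eq s1 s2 l1 l2 j hl1']
      simp only [Int.toNat_natCast]
      rfl
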